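-- pv_equiv track=rewrite | github.com/Piv94165/centrale-ei-web | backend/recommandation.py | term_movie_incidence_dico
-- ===== SOURCE A (Python) =====
-- def term_movie_incidence_dico (Movies,terms):
--     #Movies : dico {id_movie : [terms]}
--     #terms : liste [terms]
--     term_movie_matrix = {}
--     for term in terms:
--         term_movie_matrix[term] = []
--         for movie in Movies:
--             if term in Movies[movie]:
--                  term_movie_matrix[term].append(1)
--             else:
--                 term_movie_matrix[term].append(0)
--     return term_movie_matrix
-- ===== SOURCE B (Python) =====
-- def term_movie_incidence_dico(Movies, terms):
--     # Pre-build a zero row per term, then scatter each movie's own terms into its column.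
--     n = len(Movies)
--     term_movie_matrix = {term: [0] * n for term in terms}
--     for i, movie_terms in enumerate(Movies.values()):
--         for t in movie_terms:
--             if t in term_movie_matrix:
--                 term_movie_matrix[t][i] = 1
--     return term_movie_matrix
-- ===== Notes on version B (the rewrite author's own statement) =====
-- stated objective: faster
-- what changed: Instead of scanning every movie's term list once per requested term (term-outer membership scans), B pre-builds a zero row per term and makes one pass over the movies, scattering each movie's own terms into its column via a dict lookup.
import Mathlib
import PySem

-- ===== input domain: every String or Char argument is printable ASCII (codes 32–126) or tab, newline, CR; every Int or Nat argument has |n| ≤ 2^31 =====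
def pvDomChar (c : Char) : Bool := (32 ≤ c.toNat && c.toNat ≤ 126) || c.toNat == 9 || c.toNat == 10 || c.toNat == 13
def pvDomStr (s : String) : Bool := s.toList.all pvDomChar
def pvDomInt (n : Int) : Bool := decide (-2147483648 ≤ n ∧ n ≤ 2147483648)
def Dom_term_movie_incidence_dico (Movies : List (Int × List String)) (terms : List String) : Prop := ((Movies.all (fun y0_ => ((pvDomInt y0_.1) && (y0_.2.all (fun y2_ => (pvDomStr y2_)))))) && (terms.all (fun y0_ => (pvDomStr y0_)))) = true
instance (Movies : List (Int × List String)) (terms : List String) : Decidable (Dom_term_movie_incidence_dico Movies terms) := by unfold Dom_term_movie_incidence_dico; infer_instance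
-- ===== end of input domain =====

-- B replaces A's term-outer membership scans by one pass over the movies that scatters each
-- movie's own terms into a pre-built zero table (objective: faster).

-- ===== PORT A =====
-- A: for each term, build its row by iterating over the dict's keys 'movie' and testing
-- 'term in Movies[movie]'; rows are inserted (overwriting) into the result dict.
def term_movie_incidence_dico (Movies : List (Int × List String)) (terms : List String) : List (String × List Int) :=
  (terms.foldl (fun d term =>
      d.insert term (Movies.foldl (fun row movie =>
        row ++ [if (((PySem.Dict.mk Movies).get? movie.1).getD []).contains term then (1 : Int) else 0]) []))
    PySem.Dict.empty).items

-- ===== PORT B =====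
-- B's scatter pass: for i, movie_terms in enumerate(Movies.values()):
--   for t in movie_terms: if t in matrix: matrix[t][i] = 1
def pvAltScatter (i : Nat) (vals : List (List String)) (d : PySem.Dict String (List Int)) : PySem.Dict String (List Int) :=
  match vals with
  | [] => d
  | L :: rest =>
      pvAltScatter (i + 1) rest
        (L.foldl (fun d t => if d.contains t then d.modify t [] (fun row => row.set i 1) else d) d)

def term_movie_incidence_dico_alt (Movies : List (Int × List String)) (terms : List String) : List (String × List Int) :=
  let n := Movies.length
  let init := terms.foldl (fun d term => d.insert term (List.replicate n (0 : Int))) PySem.Dict.empty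
  (pvAltScatter 0 (Movies.map (fun p => p.2)) init).items

-- ===== PRECONDITION & SPEC =====
-- Pre_ excludes pair lists with duplicate movie ids: Movies stands for a Python dict, which cannot
-- hold duplicate keys, so the first-match reading of a duplicate-key list is accidental.
def Pre_term_movie_incidence_dico (Movies : List (Int × List String)) (terms : List String) : Prop :=
  (Movies.map (fun p => p.1)).Nodup

instance (Movies : List (Int × List String)) (terms : List String) : Decidable (Pre_term_movie_incidence_dico Movies terms) := by
  unfold Pre_term_movie_incidence_dico; infer_instance

def pvWitness_term_movie_incidence_dico : (List (Int × List String)) × List String :=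
  ([(1, ["a"]), (2, ["b"])], ["a", "b", "c"])

def Spec_term_movie_incidence_dico (Movies : List (Int × List String)) (terms : List String) (out : List (String × List Int)) : Prop := out = term_movie_incidence_dico_alt Movies terms
instance (Movies : List (Int × List String)) (terms : List String) (out : List (String × List Int)) : Decidable (Spec_term_movie_incidence_dico Movies terms out) := by unfold Spec_term_movie_incidence_dico; infer_instance

-- ===== CLAIM (what is proved, stated in full; the proofs are below) =====
def Claim_equal_term_movie_incidence_dico : Prop := ∀ (Movies : List (Int × List String)) (terms : List String), Dom_term_movie_incidence_dico Movies terms → Pre_term_movie_incidence_dico Movies terms → Spec_term_movie_incidence_dico Movies terms (term_movie_incidence_dico Movies terms)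

-- ===== LEMMAS AND PROOFS =====

-- 'shaped' dicts: an items list of the form ks.map (fun k => (k, g k))
theorem pv_contains_shaped (ks : List String) (g : String → List Int) (t : String) :
    (PySem.Dict.mk (ks.map (fun k => (k, g k)))).contains t = ks.contains t := by
  show (ks.map (fun k => (k, g k))).any (fun p => p.1 == t) = ks.contains t
  rw [List.any_map]
  simp [Function.comp_def, List.any_beq']

theorem pv_keys_shaped (ks : List String) (g : String → List Int) :
    (PySem.Dict.mk (ks.map (fun k => (k, g k)))).keys = ks := by
  show (ks.map (fun k => (k, g k))).map (fun p => p.1) = ks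
  rw [List.map_map]
  simp [Function.comp_def]

theorem pv_insert_shaped_mem (ks : List String) (g : String → List Int) (t : String)
    (hmem : t ∈ ks) (v : List Int) :
    (PySem.Dict.mk (ks.map (fun k => (k, g k)))).insert t v
      = PySem.Dict.mk (ks.map (fun k => (k, if k == t then v else g k))) := by
  have hct : ks.contains t = true := by simp [List.contains_eq_mem, hmem]
  apply PySem.Dict.ext
  rw [PySem.Dict.items_insert, pv_contains_shaped, hct, if_pos rfl]
  show List.map _ (ks.map _) = _
  rw [List.map_map]
  apply List.map_congr_left
  intro k _
  by_cases hk : k = t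
  · subst hk; simp
  · simp [hk]

theorem pv_insert_shaped_not_mem (ks : List String) (g : String → List Int) (t : String)
    (hmem : t ∉ ks) (v : List Int) :
    (PySem.Dict.mk (ks.map (fun k => (k, g k)))).insert t v
      = PySem.Dict.mk ((ks.map (fun k => (k, g k))) ++ [(t, v)]) := by
  have hct : ks.contains t = false := by simp [List.contains_eq_mem, hmem]
  apply PySem.Dict.ext
  rw [PySem.Dict.items_insert, pv_contains_shaped, hct]
  simp

theorem pv_getD_shaped (ks : List String) (g : String → List Int) (t : String)
    (hnd : ks.Nodup) (hmem : t ∈ ks) :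
    (PySem.Dict.mk (ks.map (fun k => (k, g k)))).getD t [] = g t := by
  apply PySem.Dict.getD_of_mem_items
  · exact List.mem_map.mpr ⟨t, hmem, rfl⟩
  · rw [pv_keys_shaped]; exact hnd

-- generic: a foldl that appends one mapped element per step is a map
theorem pv_foldl_append_map {α β : Type} (f : α → β) :
    ∀ (l : List α) (acc : List β), l.foldl (fun r x => r ++ [f x]) acc = acc ++ l.map f := by
  intro l
  induction l with
  | nil => simp [List.foldl]
  | cons a l ih => intro acc; simp [List.foldl, ih]

-- a loop of inserts whose value depends only on the key turns a shaped dict into a shaped dict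
theorem pv_foldl_insert_shaped (f : String → List Int) :
    ∀ (terms ks : List String), ks.Nodup →
      terms.foldl (fun d t => d.insert t (f t)) (PySem.Dict.mk (ks.map (fun k => (k, f k))))
        = PySem.Dict.mk ((PySem.Set.update ks terms).map (fun k => (k, f k))) := by
  intro terms
  induction terms with
  | nil => intro ks _; simp [PySem.Set.update]
  | cons t rest ih =>
      intro ks hnd
      rw [List.foldl_cons]
      by_cases hmem : t ∈ ks
      · have hct : ks.contains t = true := by simp [List.contains_eq_mem, hmem]
        have hins : (PySem.Dict.mk (ks.map (fun k => (k, f k)))).insert t (f t)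
            = PySem.Dict.mk (ks.map (fun k => (k, f k))) := by
          rw [pv_insert_shaped_mem ks f t hmem (f t)]
          congr 1
          apply List.map_congr_left
          intro k _
          by_cases hk : k = t
          · subst hk; simp
          · simp [hk]
        have hadd : PySem.Set.add ks t = ks := by
          simp only [PySem.Set.add, PySem.Set.contains, hct, if_pos]
        rw [hins]
        have hupd : PySem.Set.update ks (t :: rest) = PySem.Set.update ks rest := by
          show PySem.Set.update (PySem.Set.add ks t) rest = _
          rw [hadd]
        rw [hupd]
        exact ih ks hnd
      · have hct : ks.contains t = false := by simp [List.contains_eq_mem, hmem]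
        have hins : (PySem.Dict.mk (ks.map (fun k => (k, f k)))).insert t (f t)
            = PySem.Dict.mk ((ks ++ [t]).map (fun k => (k, f k))) := by
          rw [pv_insert_shaped_not_mem ks f t hmem (f t)]
          simp
        have hadd : PySem.Set.add ks t = ks ++ [t] := by
          simp only [PySem.Set.add, PySem.Set.contains, hct, Bool.false_eq_true, if_false]
        have hnd' : (ks ++ [t]).Nodup := by
          simp only [List.nodup_append, hnd, List.nodup_singleton, true_and]
          intro a ha b hb hab
          rw [List.mem_singleton] at hb
          exact hmem ((hb ▸ hab) ▸ ha)
        rw [hins]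
        have hupd : PySem.Set.update ks (t :: rest) = PySem.Set.update (ks ++ [t]) rest := by
          show PySem.Set.update (PySem.Set.add ks t) rest = _
          rw [hadd]
        rw [hupd]
        exact ih (ks ++ [t]) hnd'

-- B's inner loop over one movie's term list, on a shaped dict
theorem pv_scatter_inner (i : Nat) :
    ∀ (L ks : List String) (g : String → List Int), ks.Nodup →
      L.foldl (fun d t => if d.contains t then d.modify t [] (fun row => row.set i 1) else d)
          (PySem.Dict.mk (ks.map (fun k => (k, g k))))
        = PySem.Dict.mk (ks.map (fun k => (k, if L.contains k then (g k).set i 1 else g k))) := by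
  intro L
  induction L with
  | nil => intro ks g _; simp
  | cons a L' ih =>
      intro ks g hnd
      rw [List.foldl_cons, pv_contains_shaped]
      by_cases hmem : a ∈ ks
      · have hca : ks.contains a = true := by simp [List.contains_eq_mem, hmem]
        rw [hca, if_pos rfl]
        have hstep : (PySem.Dict.mk (ks.map (fun k => (k, g k)))).modify a [] (fun row => row.set i 1)
            = PySem.Dict.mk (ks.map (fun k => (k, if k == a then (g a).set i 1 else g k))) := by
          unfold PySem.Dict.modify
          rw [pv_getD_shaped ks g a hnd hmem]
          exact pv_insert_shaped_mem ks g a hmem _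
        rw [hstep]
        have hshape : (ks.map (fun k => (k, if k == a then (g a).set i 1 else g k)))
            = ks.map (fun k => (k, (fun k => if k == a then (g a).set i 1 else g k) k)) := rfl
        rw [hshape, ih ks _ hnd]
        congr 1
        apply List.map_congr_left
        intro k hkmem
        by_cases hk : k = a
        · subst hk
          by_cases hL : L'.contains k
          · simp [List.set_set]
          · simp
        · have hkb : (k == a) = false := by simpa using hk
          simp [hk, hkb]
      · have hca : ks.contains a = false := by simp [List.contains_eq_mem, hmem]
        rw [hca]
        simp only [Bool.false_eq_true, if_false]
        rw [ih ks g hnd]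
        congr 1
        apply List.map_congr_left
        intro k hkmem
        have hk : k ≠ a := fun h => hmem (h ▸ hkmem)
        have hkb : (k == a) = false := by simpa using hk
        simp [hk]

-- per-key effect of the full scatter pass
def pvApplyFrom (i : Nat) (vals : List (List String)) (k : String) (v : List Int) : List Int :=
  match vals with
  | [] => v
  | L :: rest => pvApplyFrom (i + 1) rest k (if L.contains k then v.set i 1 else v)

theorem pv_scatter_shaped :
    ∀ (vals : List (List String)) (i : Nat) (ks : List String) (g : String → List Int), ks.Nodup →
      pvAltScatter i vals (PySem.Dict.mk (ks.map (fun k => (k, g k))))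
        = PySem.Dict.mk (ks.map (fun k => (k, pvApplyFrom i vals k (g k)))) := by
  intro vals
  induction vals with
  | nil => intro i ks g _; simp [pvAltScatter, pvApplyFrom]
  | cons L rest ih =>
      intro i ks g hnd
      unfold pvAltScatter
      rw [pv_scatter_inner i L ks g hnd]
      rw [ih (i + 1) ks _ hnd]
      simp only [pvApplyFrom]

-- the per-key scatter value on an all-zero row is exactly A's membership row
theorem pv_applyFrom_row (k : String) :
    ∀ (ms : List (Int × List String)) (i : Nat) (v : List Int),
      v.length = i + ms.length → (∀ (j : Nat) (h : j < v.length), i ≤ j → v[j] = 0) →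
      pvApplyFrom i (ms.map (fun p => p.2)) k v
        = v.take i ++ ms.map (fun p => if p.2.contains k then (1 : Int) else 0) := by
  intro ms
  induction ms with
  | nil =>
      intro i v hlen _
      simp only [List.map_nil, pvApplyFrom, List.length_nil, Nat.add_zero] at *
      simp [List.take_of_length_le (le_of_eq hlen)]
  | cons p ms' ih =>
      intro i v hlen hz
      have hi : i < v.length := by simp [hlen]
      set v' := if p.2.contains k then v.set i 1 else v with hv'
      have hlen' : v'.length = v.length := by
        rw [hv']; split <;> simp
      have hz' : ∀ (j : Nat) (h : j < v'.length), i + 1 ≤ j → v'[j] = 0 := by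
        intro j hj hij
        have hjv : j < v.length := by rwa [hlen'] at hj
        by_cases h : p.2.contains k
        · simp only [hv', if_pos h]
          rw [List.getElem_set_ne (by omega)]
          exact hz j hjv (by omega)
        · simp only [hv', if_neg h]
          exact hz j hjv (by omega)
      have htake : v'.take (i + 1) = v.take i ++ [if p.2.contains k then (1 : Int) else 0] := by
        have hi' : i < v'.length := by rwa [hlen']
        rw [List.take_add_one, List.getElem?_eq_getElem hi']
        congr 1
        · by_cases h : p.2.contains k
          · rw [hv', if_pos h, List.take_set]
            rw [List.set_eq_of_length_le (by simp)]
          · rw [hv', if_neg h]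
        · by_cases h : p.2.contains k
          · have hval : v'[i] = (1 : Int) := by
              simp only [hv', if_pos h]
              exact List.getElem_set_self (by simpa using hi)
            have hm : k ∈ p.2 := by simpa [List.contains_eq_mem] using h
            simp [hval, hm]
          · have hval : v'[i] = (0 : Int) := by
              simp only [hv', if_neg h]
              exact hz i hi (le_refl i)
            have hm : k ∉ p.2 := by simpa [List.contains_eq_mem] using h
            simp [hval, hm]
      simp only [List.map_cons, pvApplyFrom]
      rw [← hv']
      rw [ih (i + 1) v' (by rw [hlen', hlen, List.length_cons]; try omega) hz']
      rw [htake]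
      simp

-- under Pre_, the dict lookup A performs returns the pair's own term list
theorem pv_rowA_eq (Movies : List (Int × List String)) (hnd : (Movies.map (fun p => p.1)).Nodup)
    (t : String) :
    Movies.foldl (fun row movie =>
        row ++ [if (((PySem.Dict.mk Movies).get? movie.1).getD []).contains t then (1 : Int) else 0]) []
      = Movies.map (fun p => if p.2.contains t then (1 : Int) else 0) := by
  rw [pv_foldl_append_map]
  simp only [List.nil_append]
  apply List.map_congr_left
  intro p hp
  have hget : (PySem.Dict.mk Movies).get? p.1 = some p.2 := by
    apply PySem.Dict.get?_of_mem_items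
    · exact hp
    · exact hnd
  rw [hget]
  rfl

-- ===== VERDICT (by name: the statement is the Claim_ definition above) =====
theorem term_movie_incidence_dico_spec : Claim_equal_term_movie_incidence_dico := by
  intro Movies terms _ hpre
  unfold Spec_term_movie_incidence_dico
  have hnd : (Movies.map (fun p => p.1)).Nodup := hpre
  have hA : term_movie_incidence_dico Movies terms
      = (PySem.Set.update [] terms).map (fun k => (k, Movies.foldl (fun row movie =>
          row ++ [if (((PySem.Dict.mk Movies).get? movie.1).getD []).contains k then (1 : Int) else 0]) [])) := by
    unfold term_movie_incidence_dico
    rw [show (PySem.Dict.empty : PySem.Dict String (List Int))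
          = PySem.Dict.mk (([] : List String).map (fun k => (k, Movies.foldl (fun row movie =>
              row ++ [if (((PySem.Dict.mk Movies).get? movie.1).getD []).contains k then (1 : Int) else 0]) []))) from rfl,
        pv_foldl_insert_shaped _ terms [] List.nodup_nil]
  have hB : term_movie_incidence_dico_alt Movies terms
      = (PySem.Set.update [] terms).map (fun k =>
          (k, pvApplyFrom 0 (Movies.map (fun p => p.2)) k (List.replicate Movies.length 0))) := by
    unfold term_movie_incidence_dico_alt
    show (pvAltScatter 0 (Movies.map (fun p => p.2))
        (terms.foldl (fun d term => d.insert term (List.replicate Movies.length (0 : Int)))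
          PySem.Dict.empty)).items = _
    rw [show (PySem.Dict.empty : PySem.Dict String (List Int))
          = PySem.Dict.mk (([] : List String).map (fun k => (k, List.replicate Movies.length (0 : Int)))) from rfl,
        pv_foldl_insert_shaped _ terms [] List.nodup_nil,
        pv_scatter_shaped (Movies.map (fun p => p.2)) 0 _ _ (PySem.Set.nodup_update [] terms List.nodup_nil)]
  rw [hA, hB]
  apply List.map_congr_left
  intro t _
  refine Prod.ext rfl ?_
  show Movies.foldl _ [] = pvApplyFrom 0 (Movies.map (fun p => p.2)) t (List.replicate Movies.length 0)
  rw [pv_rowA_eq Movies hnd t,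
      pv_applyFrom_row t Movies 0 (List.replicate Movies.length 0) (by simp)
        (by intro j hj _; simp)]
  simp
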